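-- pv_equiv track=rewrite | github.com/DewerDarkGamer/DewerARRenameWebAppFinal | github_files/github_files/app.py | has_varied_widths
-- ===== SOURCE A (Python) =====
-- def has_varied_widths(line):
--     """Check if a line has varied bar/space widths (characteristic of barcodes)"""
--     try:
--         # Find runs of consecutive same values
--         runs = []
--         current_value = line[0]
--         current_length = 1
--
--         for i in range(1, len(line)):
--             if line[i] == current_value:
--                 current_length += 1
--             else:
--                 runs.append(current_length)
--                 current_value = line[i]
--                 current_length = 1
--         runs.append(current_length)
--
--         if len(runs) < 10:  # Too few runs
--             return False
--
--         # Check for variation in run lengths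
--         unique_lengths = len(set(runs))
--         return unique_lengths >= 3  # At least 3 different bar/space widths
--
--     except Exception:
--         return False
-- ===== SOURCE B (Python) =====
-- def has_varied_widths(line):
--     """Check if a line has varied bar/space widths (characteristic of barcodes)"""
--     n = len(line)
--     if n == 0:
--         return False
--     # transition boundaries: positions where the value changes, framed by 0 and n
--     bounds = [0] + [i for i in range(1, n) if line[i] != line[i - 1]] + [n]
--     # run widths are the adjacent differences of the boundary positions
--     widths = [bounds[i + 1] - bounds[i] for i in range(len(bounds) - 1)]
--     if len(widths) < 10:
--         return False
--     return len(set(widths)) >= 3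
-- ===== Notes on version B (the rewrite author's own statement) =====
-- stated objective: alternative
-- what changed: Instead of A's single stateful run-length-encoding pass (current_value/current_length accumulator under try/except), B first collects the transition boundary indices (0, each index where the value changes, and n) and derives run widths as adjacent differences of that index list, then applies the same >=10 runs / >=3 distinct widths test; the empty line is handled by an explicit guard rather than a caught IndexError.
import Mathlib
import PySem

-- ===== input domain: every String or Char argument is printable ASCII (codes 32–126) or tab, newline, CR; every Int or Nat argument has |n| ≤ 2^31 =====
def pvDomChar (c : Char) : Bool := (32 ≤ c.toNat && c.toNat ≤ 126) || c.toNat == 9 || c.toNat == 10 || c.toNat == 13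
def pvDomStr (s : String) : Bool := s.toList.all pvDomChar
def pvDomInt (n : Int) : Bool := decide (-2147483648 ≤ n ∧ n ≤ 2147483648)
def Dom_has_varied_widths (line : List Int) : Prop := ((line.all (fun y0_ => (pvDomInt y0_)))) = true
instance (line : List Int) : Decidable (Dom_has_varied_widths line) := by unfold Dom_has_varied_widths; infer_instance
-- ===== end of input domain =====

-- B replaces A's stateful run-length-encoding pass by staged passes: collect the
-- transition boundary indices, take adjacent differences as the run widths, then test.

-- ===== PORT A =====
-- A's for-loop over line[1:] with state (runs, current_value, current_length);
-- the empty line raises IndexError reading the first element, caught by `except Exception: return False`.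
def has_varied_widths (line : List Int) : Bool :=
  match line with
  | [] => false
  | v :: rest =>
    let s := rest.foldl (fun (s : List Int × Int × Int) x =>
      if x == s.2.1 then (s.1, s.2.1, s.2.2 + 1)
      else (s.1 ++ [s.2.2], x, 1)) ([], v, 1)
    let runs := s.1 ++ [s.2.2]
    if runs.length < 10 then false
    else decide ((PySem.Set.ofList runs).length ≥ 3)

-- ===== PORT B =====
-- Source B: bounds = [0] + [i for i in range(1, n) if line[i] != line[i-1]] + [n];
-- widths = adjacent differences of bounds; then the two checks. All list indices
-- in Source B are in range, so List.getD is exact.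
def has_varied_widths_alt (line : List Int) : Bool :=
  let n := line.length
  if n == 0 then false
  else
    let bounds : List Nat :=
      0 :: ((List.range' 1 (n - 1)).filter (fun i => line.getD i 0 != line.getD (i - 1) 0)) ++ [n]
    let widths : List Int :=
      (List.range (bounds.length - 1)).map
        (fun i => ((bounds.getD (i + 1) 0 : Nat) : Int) - ((bounds.getD i 0 : Nat) : Int))
    if widths.length < 10 then false
    else decide ((PySem.Set.ofList widths).length ≥ 3)

-- ===== PRECONDITION & SPEC =====
def Spec_has_varied_widths (line : List Int) (out : Bool) : Prop := out = has_varied_widths_alt line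
instance (line : List Int) (out : Bool) : Decidable (Spec_has_varied_widths line out) := by unfold Spec_has_varied_widths; infer_instance

-- ===== CLAIM (what is proved, stated in full; the proofs are below) =====
def Claim_equal_has_varied_widths : Prop := ∀ (line : List Int), Dom_has_varied_widths line → Spec_has_varied_widths line (has_varied_widths line)

-- ===== LEMMAS AND PROOFS =====

-- canonical span decomposition of a line into run lengths (proof-only helper)
def runsC : List Int → List Int
  | [] => []
  | x :: xs =>
    (((xs.takeWhile (fun y => y == x)).length : Int) + 1)
      :: runsC (xs.dropWhile (fun y => y == x))
termination_by l => l.length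
decreasing_by
  simpa using Nat.lt_succ_of_le (xs.length_dropWhile_le _)

-- the boundary-index list of Source B, as a function (proof-only helper)
def bndList (l : List Int) : List Nat :=
  (List.range' 1 (l.length - 1)).filter (fun i => l.getD i 0 != l.getD (i - 1) 0)

-- adjacent differences, recursively (proof-only helper)
def adjI : List Nat → List Int
  | a :: b :: t => ((b : Int) - (a : Int)) :: adjI (b :: t)
  | _ => []

-- A's fold, started from any state, finalises to the accumulated runs followed by the
-- span decomposition of the remaining input (the current run extended by cl - 1).
lemma foldl_runs (l : List Int) : ∀ (runs : List Int) (cv cl : Int),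
    (let s := l.foldl (fun (s : List Int × Int × Int) x =>
        if x == s.2.1 then (s.1, s.2.1, s.2.2 + 1)
        else (s.1 ++ [s.2.2], x, 1)) (runs, cv, cl)
     s.1 ++ [s.2.2])
    = runs ++ (cl + ((l.takeWhile (fun y => y == cv)).length : Int))
        :: runsC (l.dropWhile (fun y => y == cv)) := by
  induction l with
  | nil => intro runs cv cl; simp [runsC]
  | cons x xs ih =>
    intro runs cv cl
    by_cases h : x = cv
    · subst h
      simp only [List.foldl_cons, List.takeWhile_cons, List.dropWhile_cons,
        beq_self_eq_true]
      rw [ih]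
      simp; ring_nf
    · have hb : (x == cv) = false := by simp [h]
      simp only [List.foldl_cons, List.takeWhile_cons, List.dropWhile_cons, hb,
        if_false, Bool.false_eq_true]
      rw [ih]
      simp [runsC]
      ring_nf

-- A's runs list is the span decomposition
lemma runsA_eq (v : Int) (rest : List Int) :
    (let s := rest.foldl (fun (s : List Int × Int × Int) x =>
        if x == s.2.1 then (s.1, s.2.1, s.2.2 + 1)
        else (s.1 ++ [s.2.2], x, 1)) ([], v, 1)
     s.1 ++ [s.2.2]) = runsC (v :: rest) := by
  rw [foldl_runs]
  simp [runsC]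
  ring_nf

-- Source B's index-comprehension of adjacent differences equals the recursive adjI
lemma widths_eq_adjI : ∀ (l : List Nat),
    (List.range (l.length - 1)).map
      (fun i => ((l.getD (i + 1) 0 : Nat) : Int) - ((l.getD i 0 : Nat) : Int)) = adjI l
  | [] => by simp [adjI]
  | [a] => by simp [adjI]
  | a :: b :: t => by
    have ih := widths_eq_adjI (b :: t)
    simp only [List.length_cons, Nat.add_sub_cancel] at *
    rw [List.range_succ_eq_map]
    simp only [List.map_cons, List.map_map]
    rw [show ((fun i => (((a :: b :: t).getD (i + 1) 0 : Nat) : Int) - (((a :: b :: t).getD i 0 : Nat) : Int)) ∘ Nat.succ)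
        = (fun i => (((b :: t).getD (i + 1) 0 : Nat) : Int) - (((b :: t).getD i 0 : Nat) : Int)) from rfl]
    rw [ih]
    simp [adjI]

-- uniform shifts do not change adjacent differences
lemma adjI_map_add (k : Nat) : ∀ (l : List Nat), adjI (l.map (· + k)) = adjI l
  | [] => rfl
  | [a] => rfl
  | a :: b :: t => by
    simp only [List.map_cons, adjI]
    have ih := adjI_map_add k (b :: t)
    simp only [List.map_cons] at ih
    rw [ih]
    congr 1
    push_cast; ring

-- inside the first run (indices < takeWhile-length + 1) every element is x
lemma getD_first_run (x : Int) (xs : List Int) (i : Nat)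
    (hi : i < (xs.takeWhile (fun y => y == x)).length + 1) :
    (x :: xs).getD i 0 = x := by
  cases i with
  | zero => rfl
  | succ j =>
    have hj : j < (xs.takeWhile (fun y => y == x)).length := by omega
    have hxs : xs = xs.takeWhile (fun y => y == x) ++ xs.dropWhile (fun y => y == x) :=
      (List.takeWhile_append_dropWhile).symm
    show xs.getD j 0 = x
    rw [hxs, List.getD_append _ _ _ _ hj, List.getD_eq_getElem _ _ hj]
    have hmem : (xs.takeWhile (fun y => y == x))[j] ∈ xs.takeWhile (fun y => y == x) :=
      List.getElem_mem hj
    have := List.mem_takeWhile_imp hmem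
    exact eq_of_beq this

-- past the first run, indexing into line is indexing into the dropWhile remainder
lemma getD_shift (x : Int) (xs : List Int) (j : Nat) :
    (x :: xs).getD (j + ((xs.takeWhile (fun y => y == x)).length + 1)) 0
      = (xs.dropWhile (fun y => y == x)).getD j 0 := by
  have hline : x :: xs
      = (x :: xs.takeWhile (fun y => y == x)) ++ xs.dropWhile (fun y => y == x) := by
    simp [List.takeWhile_append_dropWhile]
  have hlen2 : (x :: xs.takeWhile (fun y => y == x)).length
      ≤ j + ((xs.takeWhile (fun y => y == x)).length + 1) := by simp
  rw [hline, List.getD_append_right _ _ _ _ hlen2]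
  congr 1
  simp

-- the head of a nonempty dropWhile fails the predicate
lemma dropWhile_head_false (p : Int → Bool) :
    ∀ (l : List Int) (r : Int) (rs : List Int), l.dropWhile p = r :: rs → p r = false
  | [], r, rs, h => by simp at h
  | y :: ys, r, rs, h => by
    by_cases hp : p y = true
    · rw [List.dropWhile_cons_of_pos hp] at h
      exact dropWhile_head_false p ys r rs h
    · rw [List.dropWhile_cons_of_neg hp] at h
      cases h
      simpa using hp

-- the boundary list of x :: xs: empty for a constant line, else the end of the first
-- run followed by the shifted boundary list of the remainder
lemma bndList_cons (x : Int) (xs : List Int) :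
    bndList (x :: xs) =
      if xs.dropWhile (fun y => y == x) = [] then []
      else ((xs.takeWhile (fun y => y == x)).length + 1)
        :: (bndList (xs.dropWhile (fun y => y == x))).map
             (· + ((xs.takeWhile (fun y => y == x)).length + 1)) := by
  have hlen : xs.length
      = (xs.takeWhile (fun y => y == x)).length + (xs.dropWhile (fun y => y == x)).length := by
    have h := congrArg List.length
      (List.takeWhile_append_dropWhile (p := fun y => y == x) (l := xs))
    rw [List.length_append] at h
    exact h.symm
  unfold bndList
  simp only [List.length_cons, Nat.add_sub_cancel]
  have hsplit : List.range' 1 xs.length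
      = List.range' 1 (xs.takeWhile (fun y => y == x)).length
        ++ List.range' ((xs.takeWhile (fun y => y == x)).length + 1)
             (xs.dropWhile (fun y => y == x)).length := by
    have h := List.range'_append (s := 1) (m := (xs.takeWhile (fun y => y == x)).length)
      (n := (xs.dropWhile (fun y => y == x)).length) (step := 1)
    rw [show 1 + 1 * (xs.takeWhile (fun y => y == x)).length
        = (xs.takeWhile (fun y => y == x)).length + 1 by omega] at h
    rw [← hlen] at h
    exact h.symm
  rw [hsplit, List.filter_append]
  have hfirst : (List.range' 1 (xs.takeWhile (fun y => y == x)).length).filter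
      (fun i => (x :: xs).getD i 0 != (x :: xs).getD (i - 1) 0) = [] := by
    rw [List.filter_eq_nil_iff]
    intro a ha
    rw [List.mem_range'_1] at ha
    rw [getD_first_run x xs a (by omega), getD_first_run x xs (a - 1) (by omega)]
    simp
  rw [hfirst, List.nil_append]
  by_cases hnil : xs.dropWhile (fun y => y == x) = []
  · rw [if_pos hnil, hnil]
    simp
  · rw [if_neg hnil]
    obtain ⟨r, rs, hcons⟩ := List.exists_cons_of_ne_nil hnil
    rw [hcons, List.length_cons, List.range'_succ, List.filter_cons]
    have h1 : (x :: xs).getD ((xs.takeWhile (fun y => y == x)).length + 1) 0 = r := by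
      have h0 := getD_shift x xs 0
      rw [hcons] at h0
      simpa using h0
    have h2 : (x :: xs).getD ((xs.takeWhile (fun y => y == x)).length + 1 - 1) 0 = x :=
      getD_first_run x xs _ (by omega)
    have hrx : (r == x) = false := dropWhile_head_false _ xs r rs hcons
    rw [if_pos (by rw [h1, h2]; simp [bne, hrx])]
    have hmapr : List.range' ((xs.takeWhile (fun y => y == x)).length + 1 + 1) rs.length
        = (List.range' 1 rs.length).map (· + ((xs.takeWhile (fun y => y == x)).length + 1)) := by
      rw [List.range'_eq_map_range, List.range'_eq_map_range, List.map_map]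
      apply List.map_congr_left
      intro a _
      simp
      omega
    rw [hmapr, List.filter_map]
    simp only [Nat.add_sub_cancel]
    congr 1
    refine congrArg
      (List.map (fun j => j + ((List.takeWhile (fun y => y == x) xs).length + 1)))
      (List.filter_congr ?_)
    intro i hi
    rw [List.mem_range'_1] at hi
    have e1 : (x :: xs).getD (i + ((xs.takeWhile (fun y => y == x)).length + 1)) 0
        = (r :: rs).getD i 0 := by
      have h0 := getD_shift x xs i
      rw [hcons] at h0
      exact h0
    have e2 : (x :: xs).getD (i + ((xs.takeWhile (fun y => y == x)).length + 1) - 1) 0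
        = (r :: rs).getD (i - 1) 0 := by
      have h0 := getD_shift x xs (i - 1)
      rw [hcons] at h0
      rw [show i + ((xs.takeWhile (fun y => y == x)).length + 1) - 1
          = (i - 1) + ((xs.takeWhile (fun y => y == x)).length + 1) by omega]
      exact h0
    show ((x :: xs).getD (i + ((xs.takeWhile (fun y => y == x)).length + 1)) 0
        != (x :: xs).getD (i + ((xs.takeWhile (fun y => y == x)).length + 1) - 1) 0)
      = ((r :: rs).getD i 0 != (r :: rs).getD (i - 1) 0)
    rw [e1, e2]

-- a uniform shift of the inner entries commutes with adjI through the 0-framed list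
lemma adjI_zero_cons_shift (k : Nat) (L : List Nat) :
    adjI (0 :: k :: (L.map (· + k))) = (k : Int) :: adjI (0 :: L) := by
  have h : (k :: L.map (· + k)) = (0 :: L).map (· + k) := by simp
  rw [show adjI (0 :: k :: L.map (· + k))
      = ((k : Int) - (0 : Nat)) :: adjI (k :: L.map (· + k)) from rfl]
  rw [h, adjI_map_add]
  simp

-- adjacent differences of the 0/n-framed boundary list are the run lengths
lemma adjI_bnd : ∀ (N : Nat) (x : Int) (xs : List Int), xs.length ≤ N →
    adjI (0 :: bndList (x :: xs) ++ [(x :: xs).length]) = runsC (x :: xs) := by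
  intro N
  induction N with
  | zero =>
    intro x xs h
    cases xs with
    | nil => simp [bndList, adjI, runsC]
    | cons a b => simp at h
  | succ N ih =>
    intro x xs h
    rw [bndList_cons]
    by_cases hnil : xs.dropWhile (fun y => y == x) = []
    · rw [if_pos hnil]
      have htwlen : (xs.takeWhile (fun y => y == x)).length = xs.length := by
        have h2 := congrArg List.length
          (List.takeWhile_append_dropWhile (p := fun y => y == x) (l := xs))
        rw [List.length_append, hnil] at h2
        simpa using h2
      rw [show runsC (x :: xs)
          = (((xs.takeWhile (fun y => y == x)).length : Int) + 1)
            :: runsC (xs.dropWhile (fun y => y == x)) from by rw [runsC]]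
      rw [hnil, htwlen]
      simp [adjI, runsC]
    · rw [if_neg hnil]
      obtain ⟨r, rs, hcons⟩ := List.exists_cons_of_ne_nil hnil
      have hlensum : xs.length
          = (xs.takeWhile (fun y => y == x)).length + (rs.length + 1) := by
        have h2 := congrArg List.length
          (List.takeWhile_append_dropWhile (p := fun y => y == x) (l := xs))
        rw [List.length_append, hcons] at h2
        simp at h2
        omega
      have hlist : (bndList (xs.dropWhile (fun y => y == x))).map
            (· + ((xs.takeWhile (fun y => y == x)).length + 1)) ++ [(x :: xs).length]
          = ((bndList (xs.dropWhile (fun y => y == x))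
              ++ [(xs.dropWhile (fun y => y == x)).length]).map
             (· + ((xs.takeWhile (fun y => y == x)).length + 1))) := by
        rw [List.map_append]
        simp only [List.map_cons, List.map_nil, List.length_cons]
        rw [hcons]
        simp only [List.length_cons]
        congr 2
        omega
      rw [List.cons_append, List.cons_append, hlist]
      rw [show ((xs.takeWhile (fun y => y == x)).length + 1)
            :: ((bndList (xs.dropWhile (fun y => y == x))
                ++ [(xs.dropWhile (fun y => y == x)).length]).map
               (· + ((xs.takeWhile (fun y => y == x)).length + 1)))
          = ((xs.takeWhile (fun y => y == x)).length + 1)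
            :: ((bndList (xs.dropWhile (fun y => y == x))
                ++ [(xs.dropWhile (fun y => y == x)).length]).map
               (· + ((xs.takeWhile (fun y => y == x)).length + 1))) from rfl]
      rw [adjI_zero_cons_shift]
      rw [hcons]
      have hrec := ih r rs (by omega)
      rw [List.cons_append] at hrec
      simp only [List.length_cons] at hrec ⊢
      rw [hrec]
      rw [show runsC (x :: xs)
          = (((xs.takeWhile (fun y => y == x)).length : Int) + 1)
            :: runsC (xs.dropWhile (fun y => y == x)) from by rw [runsC]]
      rw [hcons]
      congr 1

-- B's body on a nonempty line, expressed through runsC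
lemma altB_eq (x : Int) (xs : List Int) :
    has_varied_widths_alt (x :: xs)
      = (if (runsC (x :: xs)).length < 10 then false
         else decide ((PySem.Set.ofList (runsC (x :: xs))).length ≥ 3)) := by
  unfold has_varied_widths_alt
  simp only [List.length_cons, Nat.add_sub_cancel]
  rw [if_neg (by simp)]
  rw [widths_eq_adjI]
  have hb : (0 :: ((List.range' 1 xs.length).filter
        (fun i => (x :: xs).getD i 0 != (x :: xs).getD (i - 1) 0)) ++ [xs.length + 1])
      = 0 :: bndList (x :: xs) ++ [(x :: xs).length] := by
    unfold bndList
    simp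
  rw [hb, adjI_bnd xs.length x xs le_rfl]

-- A's runs list, zeta-reduced form of runsA_eq
lemma runsA_eq' (x : Int) (xs : List Int) :
    (xs.foldl (fun (s : List Int × Int × Int) y =>
        if y == s.2.1 then (s.1, s.2.1, s.2.2 + 1)
        else (s.1 ++ [s.2.2], y, 1)) ([], x, 1)).1
      ++ [(xs.foldl (fun (s : List Int × Int × Int) y =>
        if y == s.2.1 then (s.1, s.2.1, s.2.2 + 1)
        else (s.1 ++ [s.2.2], y, 1)) ([], x, 1)).2.2] = runsC (x :: xs) :=
  runsA_eq x xs

-- A's body on a nonempty line, expressed through runsC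
lemma altA_eq (x : Int) (xs : List Int) :
    has_varied_widths (x :: xs)
      = (if (runsC (x :: xs)).length < 10 then false
         else decide ((PySem.Set.ofList (runsC (x :: xs))).length ≥ 3)) := by
  simp only [has_varied_widths]
  rw [runsA_eq']

-- ===== VERDICT (by name: the statement is the Claim_ definition above) =====
theorem has_varied_widths_spec : Claim_equal_has_varied_widths := by
  intro line _
  unfold Spec_has_varied_widths
  cases line with
  | nil => simp [has_varied_widths, has_varied_widths_alt]
  | cons x xs => rw [altA_eq, altB_eq]
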